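-- pv_equiv track=rewrite | github.com/maurimorero/untitled | Circules.py | solution
-- ===== SOURCE A (Python) =====
-- def solution(A):
--     circle_endpoints = []
--     for i, a in enumerate(A):
--         circle_endpoints += [(i - a, True), (i + a, False)]
--
--     circle_endpoints.sort(key=lambda x: (x[0], not x[1]))
--
--     intersections, active_circles = 0, 0
--
--     for _, is_beginning in circle_endpoints:
--         if is_beginning:
--             intersections += active_circles
--             active_circles += 1
--         else:
--             active_circles -= 1
--         if intersections > 10E6:
--             return -1
--
--     return intersections
-- ===== SOURCE B (Python) =====
-- def solution(A):
--     # Two separately sorted endpoint arrays + a forward-moving pointer,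
--     # instead of A's merged event list with an active-circle counter.
--     n = len(A)
--     lowers = sorted(i - a for i, a in enumerate(A))
--     uppers = sorted(i + a for i, a in enumerate(A))
--     total = 0
--     p = 0
--     for t, l in enumerate(lowers):
--         while p < n and uppers[p] < l:
--             p += 1
--         total += t - p
--         if total > 10E6:
--             return -1
--     return total
-- ===== Notes on version B (the rewrite author's own statement) =====
-- stated objective: faster
-- what changed: Replaced the merged begin/end event list (2n tuples sorted by a tuple key, swept with an active-circle counter) by two independently sorted plain-int endpoint arrays (lowers, uppers) scanned with a forward-moving pointer: the t-th smallest lower bound contributes t minus the number of upper bounds below it.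
import Mathlib
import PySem

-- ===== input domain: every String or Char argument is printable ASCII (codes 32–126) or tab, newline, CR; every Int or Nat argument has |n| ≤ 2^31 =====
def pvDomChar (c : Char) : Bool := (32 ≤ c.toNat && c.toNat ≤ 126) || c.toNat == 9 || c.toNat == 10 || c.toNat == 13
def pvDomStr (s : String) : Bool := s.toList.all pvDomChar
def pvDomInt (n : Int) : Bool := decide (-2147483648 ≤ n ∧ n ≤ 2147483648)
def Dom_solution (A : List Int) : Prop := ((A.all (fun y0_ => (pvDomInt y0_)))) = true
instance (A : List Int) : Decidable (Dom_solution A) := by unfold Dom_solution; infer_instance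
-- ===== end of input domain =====

-- B replaces A's merged-event sweep (one sorted begin/end event list with an active-circle
-- counter) by two independently sorted endpoint arrays scanned with a forward-moving pointer
-- (alternative decomposition, same asymptotic cost).

-- ===== PORT A =====
-- the 'for _, is_beginning in circle_endpoints' loop with its early 'return -1';
-- 'intersections > 10E6' is ported as '> 10000000': 10E6 is exactly 10^7 and
-- Python's int/float comparison is mathematically exact
def sweepA : List (Int × Bool) → Int → Int → Int
  | [], intersections, _ => intersections
  | e :: rest, intersections, active =>
    let st := if e.2 then (intersections + active, active + 1) else (intersections, active - 1)
    if st.1 > 10000000 then -1 else sweepA rest st.1 st.2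

def solution (A : List Int) : Int :=
  let circle_endpoints := (PySem.List.enumerate A).foldl
    (fun acc ia => acc ++ [(ia.1 - ia.2, true), (ia.1 + ia.2, false)]) []
  let sortedE := PySem.List.sorted2 circle_endpoints (fun x => x.1) (fun x => !x.2)
  sweepA sortedE 0 0

-- ===== PORT B =====
-- the 'while p < n and uppers[p] < l: p += 1' loop: the pointer p is the consumed
-- count; the remaining suffix of uppers is carried explicitly (exact)
def dropCountLt : List Int → Int → Int → List Int × Int
  | [], c, _ => ([], c)
  | u :: us, c, l => if u < l then dropCountLt us (c + 1) l else (u :: us, c)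

-- the 'for t, l in enumerate(lowers)' loop with its early 'return -1'
def goB : List Int → List Int → Int → Int → Int → Int
  | [], _, _, _, total => total
  | l :: ls, rem, p, t, total =>
    let rc := dropCountLt rem p l
    let total' := total + t - rc.2
    if total' > 10000000 then -1 else goB ls rc.1 rc.2 (t + 1) total'

def solution_alt (A : List Int) : Int :=
  let lowers := PySem.List.sorted ((PySem.List.enumerate A).map (fun ia => ia.1 - ia.2)) (fun x => x)
  let uppers := PySem.List.sorted ((PySem.List.enumerate A).map (fun ia => ia.1 + ia.2)) (fun x => x)
  goB lowers uppers 0 0 0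

-- ===== PRECONDITION & SPEC =====
def Spec_solution (A : List Int) (out : Int) : Prop := out = solution_alt A
instance (A : List Int) (out : Int) : Decidable (Spec_solution A out) := by unfold Spec_solution; infer_instance

-- ===== CLAIM (what is proved, stated in full; the proofs are below) =====
def Claim_equal_solution : Prop := ∀ (A : List Int), Dom_solution A → Spec_solution A (solution A)

-- ===== LEMMAS AND PROOFS =====

-- the order Python's sort key (x[0], not x[1]) induces on endpoints
def evLE (a b : Int × Bool) : Prop := a.1 < b.1 ∨ (a.1 = b.1 ∧ ((!a.2) ≤ (!b.2)))

-- the strict comparison sorted2 uses for that key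
def evBefore (a b : Int × Bool) : Bool :=
  decide (a.1 < b.1) || (!decide (b.1 < a.1) && decide ((!a.2) < (!b.2)))

-- shared middle form: for the t-th smallest lower bound l, both sides add t minus
-- the number of upper bounds strictly below l
def countLt (us : List Int) (l : Int) : Nat := (us.filter (fun u => u < l)).length

def goM (uppers : List Int) : List Int → Int → Int → Int
  | [], _, total => total
  | l :: ls, t, total =>
    let total' := total + t - (countLt uppers l : Int)
    if total' > 10000000 then -1 else goM uppers ls (t + 1) total'

def beginsOf (E : List (Int × Bool)) : List Int :=
  E.filterMap (fun e => if e.2 then some e.1 else none)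

def endsOf (E : List (Int × Bool)) : List Int :=
  E.filterMap (fun e => if e.2 then none else some e.1)

theorem dropCountLt_spec : ∀ (rem : List Int) (c l : Int),
    ∃ d r', dropCountLt rem c l = (r', c + (d.length : Int)) ∧ rem = d ++ r' ∧
      (∀ u ∈ d, u < l) ∧ (∀ u ∈ r', rem.Pairwise (fun a b => a ≤ b) → ¬ u < l) := by
  intro rem
  induction rem with
  | nil => intro c l; exact ⟨[], [], by simp [dropCountLt], rfl, by simp, by simp⟩
  | cons u us ih =>
    intro c l
    by_cases h : u < l
    · obtain ⟨d, r', h1, h2, h3, h4⟩ := ih (c + 1) l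
      refine ⟨u :: d, r', ?_, by simp [h2], ?_, ?_⟩
      · simp [dropCountLt, h, h1]; ring
      · intro x hx
        rcases List.mem_cons.mp hx with rfl | hx
        · exact h
        · exact h3 _ hx
      · intro x hx hp
        exact h4 x hx (h2 ▸ hp.of_cons)
    · refine ⟨[], u :: us, by simp [dropCountLt, h], by simp, by simp, ?_⟩
      intro x hx hp
      rcases List.mem_cons.mp hx with rfl | hx
      · exact h
      · intro hxl
        have := (List.pairwise_cons.mp hp).1 x hx
        omega

theorem goB_eq_goM :
    ∀ (ls P rem : List Int) (t total : Int),
      (P ++ rem).Pairwise (fun a b => a ≤ b) →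
      (∀ u ∈ P, ∀ l ∈ ls, u < l) →
      ls.Pairwise (fun a b => a ≤ b) →
      goB ls rem (P.length : Int) t total = goM (P ++ rem) ls t total := by
  intro ls
  induction ls with
  | nil => intro P rem t total _ _ _; simp [goB, goM]
  | cons l ls ih =>
    intro P rem t total hsorted hPlt hls
    obtain ⟨d, r', hdrop, hsplit, hdlt, hge⟩ := dropCountLt_spec rem (P.length : Int) l
    have hremsorted : rem.Pairwise (fun a b => a ≤ b) :=
      hsorted.sublist (List.sublist_append_right P rem)
    -- countLt of the whole uppers list at l is |P| + |d|
    have hcount : (countLt (P ++ rem) l : Int) = (P.length : Int) + (d.length : Int) := by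
      have h1 : (P ++ rem).filter (fun u => decide (u < l)) = P ++ d := by
        rw [hsplit, ← List.append_assoc, List.filter_append]
        have hPall : (P ++ d).filter (fun u => decide (u < l)) = P ++ d :=
          List.filter_eq_self.mpr (fun u hu => by
            rcases List.mem_append.mp hu with hu | hu
            · exact decide_eq_true (hPlt u hu l (by simp))
            · exact decide_eq_true (hdlt u hu))
        have hrall : r'.filter (fun u => decide (u < l)) = [] := by
          apply List.filter_eq_nil_iff.mpr
          intro u hu
          simp only [decide_eq_true_eq]
          exact hge u hu hremsorted
        rw [hPall, hrall, List.append_nil]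
      unfold countLt
      rw [h1]
      push_cast [List.length_append]
      ring
    show goB (l :: ls) rem (P.length : Int) t total = _
    rw [goB, goM, hdrop]
    simp only [hcount]
    have harith : total + t - ((P.length : Int) + (d.length : Int)) = total + t - ((P.length : Int) + (d.length : Int)) := rfl
    split_ifs with hchk
    · rfl
    · -- recurse with P' = P ++ d, rem' = r'
      have hlen : (P.length : Int) + (d.length : Int) = ((P ++ d).length : Int) := by
        push_cast [List.length_append]; ring
      rw [hlen]
      have hnew : ((P ++ d) ++ r') = P ++ rem := by rw [hsplit, List.append_assoc]
      have := ih (P ++ d) r' (t + 1) (total + t - ((P ++ d).length : Int))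
        (by rw [hnew]; exact hsorted)
        (by
          intro u hu l' hl'
          have hll' : l ≤ l' := (List.pairwise_cons.mp hls).1 l' hl'
          rcases List.mem_append.mp hu with hu | hu
          · have := hPlt u hu l (by simp); omega
          · have := hdlt u hu; omega)
        (List.pairwise_cons.mp hls).2
      rw [hnew] at this
      rw [← hlen] at this ⊢
      exact this

theorem evLE_trans : ∀ {a b c : Int × Bool}, evLE a b → evLE b c → evLE a c := by
  intro a b c hab hbc
  unfold evLE at *
  rcases hab with h | ⟨h1, h2⟩ <;> rcases hbc with h' | ⟨h1', h2'⟩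
  · exact Or.inl (by omega)
  · exact Or.inl (by omega)
  · exact Or.inl (by omega)
  · exact Or.inr ⟨by omega, le_trans h2 h2'⟩

theorem evBefore_true {a b : Int × Bool} (h : evBefore a b = true) : evLE a b := by
  obtain ⟨a1, a2⟩ := a; obtain ⟨b1, b2⟩ := b
  unfold evBefore at h; unfold evLE
  cases a2 <;> cases b2 <;> simp_all [Bool.lt_iff, Bool.le_iff_imp]
  all_goals omega

theorem evBefore_false {a b : Int × Bool} (h : evBefore a b = false) : evLE b a := by
  obtain ⟨a1, a2⟩ := a; obtain ⟨b1, b2⟩ := b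
  unfold evBefore at h; unfold evLE
  cases a2 <;> cases b2 <;> simp_all [Bool.lt_iff, Bool.le_iff_imp]
  all_goals omega

theorem pairwise_insertBy {x : Int × Bool} {acc : List (Int × Bool)}
    (hacc : acc.Pairwise evLE) :
    (PySem.List.insertBy evBefore x acc).Pairwise evLE := by
  induction acc with
  | nil => simp [PySem.List.insertBy]
  | cons y ys ih =>
    rw [PySem.List.insertBy]
    obtain ⟨hy, hys⟩ := List.pairwise_cons.mp hacc
    split_ifs with h
    · refine List.pairwise_cons.mpr ⟨?_, hacc⟩
      intro z hz
      rcases List.mem_cons.mp hz with rfl | hz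
      · exact evBefore_true h
      · exact evLE_trans (evBefore_true h) (hy z hz)
    · refine List.pairwise_cons.mpr ⟨?_, ih hys⟩
      intro z hz
      rcases (PySem.List.mem_insertBy evBefore x z ys).mp hz with rfl | hz
      · exact evBefore_false (Bool.eq_false_iff.mpr h)
      · exact hy z hz

theorem pairwise_foldl_insertBy :
    ∀ (xs acc : List (Int × Bool)), acc.Pairwise evLE →
      (xs.foldl (fun acc x => PySem.List.insertBy evBefore x acc) acc).Pairwise evLE := by
  intro xs
  induction xs with
  | nil => intro acc h; exact h
  | cons x xs ih => intro acc h; exact ih _ (pairwise_insertBy h)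

theorem pairwise_sorted2 (xs : List (Int × Bool)) :
    (PySem.List.sorted2 xs (fun x => x.1) (fun x => !x.2)).Pairwise evLE := by
  show (xs.foldl (fun acc x => PySem.List.insertBy evBefore x acc) []).Pairwise evLE
  exact pairwise_foldl_insertBy xs [] (by simp)

theorem beginsOf_cons_true (l : Int) (rest : List (Int × Bool)) :
    beginsOf ((l, true) :: rest) = l :: beginsOf rest := by simp [beginsOf]

theorem beginsOf_cons_false (l : Int) (rest : List (Int × Bool)) :
    beginsOf ((l, false) :: rest) = beginsOf rest := by simp [beginsOf]

theorem endsOf_cons_true (l : Int) (rest : List (Int × Bool)) :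
    endsOf ((l, true) :: rest) = endsOf rest := by simp [endsOf]

theorem endsOf_cons_false (l : Int) (rest : List (Int × Bool)) :
    endsOf ((l, false) :: rest) = l :: endsOf rest := by simp [endsOf]

theorem sweepA_cons_true (l : Int) (rest : List (Int × Bool)) (I act : Int) :
    sweepA ((l, true) :: rest) I act =
      if I + act > 10000000 then -1 else sweepA rest (I + act) (act + 1) := by
  simp [sweepA]

theorem sweepA_cons_false (l : Int) (rest : List (Int × Bool)) (I act : Int) :
    sweepA ((l, false) :: rest) I act =
      if I > 10000000 then -1 else sweepA rest I (act - 1) := by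
  simp [sweepA]

theorem goM_cons (uppers ls : List Int) (l t total : Int) :
    goM uppers (l :: ls) t total =
      if total + t - (countLt uppers l : Int) > 10000000 then -1
      else goM uppers ls (t + 1) (total + t - (countLt uppers l : Int)) := by
  simp [goM]

theorem sweepA_eq_goM (uppers : List Int) :
    ∀ (E : List (Int × Bool)) (P : List Int) (t I : Int),
      E.Pairwise evLE →
      (∀ u ∈ P, ∀ e ∈ E, e.2 = true → u < e.1) →
      uppers.Perm (P ++ endsOf E) →
      I ≤ 10000000 →
      sweepA E I (t - (P.length : Int)) = goM uppers (beginsOf E) t I := by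
  intro E
  induction E with
  | nil => intro P t I _ _ _ _; simp [sweepA, goM, beginsOf]
  | cons e rest ih =>
    intro P t I hpw hP hperm hI
    obtain ⟨l, b⟩ := e
    obtain ⟨hhead, hrest⟩ := List.pairwise_cons.mp hpw
    cases b with
    | true =>
      have hcnt : (countLt uppers l : Int) = (P.length : Int) := by
        have hfperm : (uppers.filter (fun u => decide (u < l))).length =
            ((P ++ endsOf ((l, true) :: rest)).filter (fun u => decide (u < l))).length :=
          (hperm.filter (fun u => decide (u < l))).length_eq
        have hPfull : P.filter (fun u => decide (u < l)) = P :=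
          List.filter_eq_self.mpr (fun u hu => decide_eq_true (hP u hu (l, true) (by simp) rfl))
        have hEnone : (endsOf rest).filter (fun u => decide (u < l)) = [] := by
          apply List.filter_eq_nil_iff.mpr
          intro u hu
          obtain ⟨e', he', heq⟩ := List.mem_filterMap.mp hu
          have hle := hhead e' he'
          obtain ⟨l', b'⟩ := e'
          cases b' with
          | true => simp at heq
          | false =>
            simp at heq
            subst heq
            rcases hle with h | ⟨h1, h2⟩ <;> simp <;> omega
        unfold countLt
        rw [endsOf_cons_true, List.filter_append, hPfull, hEnone, List.append_nil] at hfperm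
        rw [hfperm]
      rw [beginsOf_cons_true, sweepA_cons_true, goM_cons, hcnt]
      have harith : I + (t - (P.length : Int)) = I + t - (P.length : Int) := by ring
      rw [harith]
      split_ifs with hchk
      · rfl
      · have harith2 : t - (P.length : Int) + 1 = t + 1 - (P.length : Int) := by ring
        rw [harith2]
        exact ih P (t + 1) (I + t - (P.length : Int)) hrest
          (fun u hu e' he' hb => hP u hu e' (by simp [he']) hb)
          (by rw [endsOf_cons_true] at hperm; exact hperm)
          (by omega)
    | false =>
      rw [beginsOf_cons_false, sweepA_cons_false]
      rw [if_neg (by omega)]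
      have harith : t - (P.length : Int) - 1 = t - (((P ++ [l]).length : Int)) := by
        simp only [List.length_append, List.length_cons, List.length_nil]
        push_cast
        ring
      rw [harith]
      refine ih (P ++ [l]) t I hrest ?_ ?_ hI
      · intro u hu e' he' hb
        rcases List.mem_append.mp hu with hu | hu
        · exact hP u hu e' (by simp [he']) hb
        · have : u = l := by simpa using hu
          subst this
          have hle := hhead e' he'
          obtain ⟨l', b'⟩ := e'
          subst hb
          rcases hle with h | ⟨h1, h2⟩
          · exact h
          · simp [Bool.le_iff_imp] at h2
      · rw [endsOf_cons_false] at hperm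
        refine hperm.trans (List.Perm.of_eq ?_)
        simp

theorem beginsOf_flatMap (xs : List (Int × Int)) :
    beginsOf (xs.flatMap (fun ia => [(ia.1 - ia.2, true), (ia.1 + ia.2, false)])) =
      xs.map (fun ia => ia.1 - ia.2) := by
  induction xs with
  | nil => simp [beginsOf]
  | cons x xs ih =>
    simp only [List.flatMap_cons, List.map_cons]
    rw [show [(x.1 - x.2, true), (x.1 + x.2, false)] ++
        xs.flatMap (fun ia => [(ia.1 - ia.2, true), (ia.1 + ia.2, false)]) =
        (x.1 - x.2, true) :: (x.1 + x.2, false) ::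
        xs.flatMap (fun ia => [(ia.1 - ia.2, true), (ia.1 + ia.2, false)]) from rfl]
    rw [beginsOf_cons_true, beginsOf_cons_false, ih]

theorem endsOf_flatMap (xs : List (Int × Int)) :
    endsOf (xs.flatMap (fun ia => [(ia.1 - ia.2, true), (ia.1 + ia.2, false)])) =
      xs.map (fun ia => ia.1 + ia.2) := by
  induction xs with
  | nil => simp [endsOf]
  | cons x xs ih =>
    simp only [List.flatMap_cons, List.map_cons]
    rw [show [(x.1 - x.2, true), (x.1 + x.2, false)] ++
        xs.flatMap (fun ia => [(ia.1 - ia.2, true), (ia.1 + ia.2, false)]) =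
        (x.1 - x.2, true) :: (x.1 + x.2, false) ::
        xs.flatMap (fun ia => [(ia.1 - ia.2, true), (ia.1 + ia.2, false)]) from rfl]
    rw [endsOf_cons_true, endsOf_cons_false, ih]

theorem pairwise_le_beginsOf {E : List (Int × Bool)} (h : E.Pairwise evLE) :
    (beginsOf E).Pairwise (fun a b => a ≤ b) := by
  unfold beginsOf
  refine List.Pairwise.filterMap _ ?_ h
  intro a a' hR b hb b' hb'
  obtain ⟨a1, a2⟩ := a; obtain ⟨a1', a2'⟩ := a'
  cases a2 <;> cases a2' <;> simp_all
  subst hb hb'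
  rcases hR with hR | ⟨hR, _⟩ <;> omega

theorem solution_eq (A : List Int) : solution A = solution_alt A := by
  unfold solution solution_alt
  set enumA := PySem.List.enumerate A with henum
  set events := enumA.foldl (fun acc ia => acc ++ [(ia.1 - ia.2, true), (ia.1 + ia.2, false)]) [] with hev
  have hevents : events = enumA.flatMap (fun ia => [(ia.1 - ia.2, true), (ia.1 + ia.2, false)]) := by
    rw [hev, PySem.List.foldl_append_eq_flatMap]
    simp
  set E := PySem.List.sorted2 events (fun x => x.1) (fun x => !x.2) with hE
  set lowers := PySem.List.sorted (enumA.map (fun ia => ia.1 - ia.2)) (fun x => x) with hlow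
  set uppers := PySem.List.sorted (enumA.map (fun ia => ia.1 + ia.2)) (fun x => x) with hupp
  have hpwE : E.Pairwise evLE := pairwise_sorted2 events
  have hpermE : E.Perm events := PySem.List.sorted2_perm events _ _ _
  -- begins of E is exactly lowers
  have hbegins : lowers = beginsOf E := by
    apply PySem.List.sorted_id_eq_of_perm_of_pairwise
    · have h1 : (beginsOf E).Perm (beginsOf events) := hpermE.filterMap _
      rw [hevents, beginsOf_flatMap] at h1
      exact h1
    · exact pairwise_le_beginsOf hpwE
  have hpermU : uppers.Perm ([] ++ endsOf E) := by
    have h1 : (endsOf E).Perm (endsOf events) := hpermE.filterMap _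
    rw [hevents, endsOf_flatMap] at h1
    have h2 : uppers.Perm (enumA.map (fun ia => ia.1 + ia.2)) := PySem.List.sorted_perm _ _ _
    simpa using h2.trans h1.symm
  have hA : sweepA E 0 0 = goM uppers (beginsOf E) 0 0 := by
    have := sweepA_eq_goM uppers E [] 0 0 hpwE (by simp) hpermU (by omega)
    simpa using this
  have hB : goB lowers uppers 0 0 0 = goM uppers lowers 0 0 := by
    have := goB_eq_goM lowers [] uppers 0 0
      (by simpa using PySem.List.sorted_pairwise (enumA.map (fun ia => ia.1 + ia.2)) (fun x => x))
      (by simp)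
      (by simpa using PySem.List.sorted_pairwise (enumA.map (fun ia => ia.1 - ia.2)) (fun x => x))
    simpa using this
  rw [hA, hB, hbegins]

-- ===== VERDICT (by name: the statement is the Claim_ definition above) =====
theorem solution_spec : Claim_equal_solution := by
  intro A _
  unfold Spec_solution
  exact solution_eq A
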